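-- pv_equiv track=rewrite | github.com/KeaKohv/UT-Data-Engineering-Group-Project-2022 | dags/first_fetch_transform.py | affiliations
-- ===== SOURCE A (Python) =====
-- def affiliations(authors_parsed):
--     '''
--     Takes the 'authors_parsed' field and returns a list of the paper authors' affiliations.
--     '''
--     affiliations = []
--
--     for p in authors_parsed:
--         try:
--             end = p.index("")
--             affiliations.append(list(filter(len, p[end:])))
--         except ValueError:
--             affiliations.append([])
--     return affiliations
-- ===== SOURCE B (Python) =====
-- def affiliations(authors_parsed):
--     '''
--     Takes the 'authors_parsed' field and returns a list of the paper authors' affiliations.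
--     '''
--     result = []
--     for p in authors_parsed:
--         seen = False
--         cur = []
--         for x in p:
--             if seen:
--                 if len(x):
--                     cur.append(x)
--             elif x == "":
--                 seen = True
--         result.append(cur)
--     return result
-- ===== Notes on version B (the rewrite author's own statement) =====
-- stated objective: alternative
-- what changed: Replaces the try/index/slice/filter pipeline with a single linear scan per author list that maintains a seen-marker flag and collects non-empty strings after the marker.
import Mathlib
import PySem

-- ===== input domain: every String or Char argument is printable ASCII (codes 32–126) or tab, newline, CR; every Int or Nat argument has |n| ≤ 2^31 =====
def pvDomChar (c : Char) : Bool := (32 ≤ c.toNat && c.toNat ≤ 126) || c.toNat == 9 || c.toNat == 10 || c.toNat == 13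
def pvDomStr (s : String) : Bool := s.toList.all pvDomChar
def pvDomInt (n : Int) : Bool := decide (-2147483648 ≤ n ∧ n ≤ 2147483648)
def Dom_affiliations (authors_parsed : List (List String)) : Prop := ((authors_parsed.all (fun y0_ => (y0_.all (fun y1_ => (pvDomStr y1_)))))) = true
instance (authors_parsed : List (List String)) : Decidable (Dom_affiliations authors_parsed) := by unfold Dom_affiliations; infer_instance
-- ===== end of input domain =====

-- B replaces A's try/index/slice/filter pipeline with one linear scan per list maintaining a seen-marker flag; return value only, no side effects.

-- ===== PORT A =====
-- per-list body of A: p.index("") then list(filter(len, p[end:])), ValueError → []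
def affOneA (p : List String) : List String :=
  match PySem.List.index? p "" with
  | some e => (PySem.List.slice p (some (e : Int)) none).filter (fun s => s.toList.length != 0)
  | none => []

def affiliations (authors_parsed : List (List String)) : List (List String) :=
  authors_parsed.foldl (fun acc p => acc ++ [affOneA p]) []

-- ===== PORT B =====
-- inner loop of B: state (seen, cur), one pass over p
def affStepB (st : Bool × List String) (x : String) : Bool × List String :=
  if st.1 then
    (if x.toList.length ≠ 0 then (st.1, st.2 ++ [x]) else st)
  else if x = "" then (true, st.2) else st

def affOneB (p : List String) : List String :=
  (p.foldl affStepB (false, [])).2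

def affiliations_alt (authors_parsed : List (List String)) : List (List String) :=
  authors_parsed.foldl (fun acc p => acc ++ [affOneB p]) []

-- ===== PRECONDITION & SPEC =====
def Spec_affiliations (authors_parsed : List (List String)) (out : List (List String)) : Prop := out = affiliations_alt authors_parsed
instance (authors_parsed : List (List String)) (out : List (List String)) : Decidable (Spec_affiliations authors_parsed out) := by unfold Spec_affiliations; infer_instance

-- ===== CLAIM (what is proved, stated in full; the proofs are below) =====
def Claim_equal_affiliations : Prop := ∀ (authors_parsed : List (List String)), Dom_affiliations authors_parsed → Spec_affiliations authors_parsed (affiliations authors_parsed)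

-- ===== LEMMAS AND PROOFS =====

-- B's loop before the marker: nothing changes while "" has not been seen
theorem foldB_no_marker (p : List String) (c : List String) (h : "" ∉ p) :
    p.foldl affStepB (false, c) = (false, c) := by
  induction p generalizing c with
  | nil => rfl
  | cons x xs ih =>
    simp only [List.mem_cons, not_or] at h
    simp only [List.foldl_cons, affStepB]
    rw [if_neg (by simp), if_neg (Ne.symm h.1)]
    exact ih c h.2

-- B's loop after the marker collects exactly the non-empty strings
theorem foldB_after_marker (p : List String) (c : List String) :
    p.foldl affStepB (true, c) = (true, c ++ p.filter (fun s => s.toList.length != 0)) := by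
  induction p generalizing c with
  | nil => simp
  | cons x xs ih =>
    simp only [List.foldl_cons, affStepB]
    by_cases hx : x.toList.length ≠ 0
    · rw [if_pos trivial, if_pos hx, ih]
      simp only [List.filter_cons]
      rw [if_pos (by simpa using hx)]
      simp
    · rw [if_pos trivial, if_neg hx, ih]
      simp only [ne_eq, not_not] at hx
      simp only [List.filter_cons]
      rw [if_neg (by simpa using hx)]

theorem affOne_eq (p : List String) : affOneA p = affOneB p := by
  unfold affOneA affOneB
  rcases hi : PySem.List.index? p "" with _ | e
  · -- "" ∉ p
    have hnm : "" ∉ p := (PySem.List.index?_eq_none_iff p "").mp hi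
    rw [foldB_no_marker p [] hnm]
  · -- p = pre ++ "" :: suf
    obtain ⟨pre, suf, hps, hlen, hnm⟩ := (PySem.List.index?_eq_some_iff p "" e).mp hi
    subst hps
    subst hlen
    dsimp only
    rw [PySem.List.slice_from_natCast]
    rw [List.drop_left]
    rw [List.foldl_append, foldB_no_marker pre [] hnm]
    simp only [List.foldl_cons, affStepB]
    rw [if_neg (by simp), if_pos trivial, foldB_after_marker]
    simp

-- ===== VERDICT (by name: the statement is the Claim_ definition above) =====
theorem affiliations_spec : Claim_equal_affiliations := by
  intro l _
  unfold Spec_affiliations affiliations affiliations_alt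
  induction l using List.reverseRecOn with
  | nil => rfl
  | append_singleton xs x ih =>
    simp [List.foldl_append, affOne_eq]
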